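-- pv_equiv track=rewrite | github.com/MrBrantCode/unitest_baseline | mut_generate/mist_train_taco/taco_2734/solution.py | find_magician_numbers
-- ===== SOURCE A (Python) =====
-- def find_magician_numbers(N, queries):
--     s = 1
--     t = 0
--
--     for q in queries:
--         if q[0] == 1:
--             s *= q[1]
--             t *= q[1]
--         elif q[0] == 2:
--             t += q[1]
--         else:
--             t -= q[1]
--
--     return (-t, s)
-- ===== SOURCE B (Python) =====
-- def find_magician_numbers(N, queries):
--     # Staged passes: first build the suffix-product table of scale factors,
--     # then weight each add/subtract by the product of scales applied after it.
--     n = len(queries)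
--     suff = [1] * (n + 1)
--     for i in range(n - 1, -1, -1):
--         suff[i] = suff[i + 1] * queries[i][1] if queries[i][0] == 1 else suff[i + 1]
--     t = 0
--     for q, w in zip(queries, suff[1:]):
--         if q[0] == 2:
--             t += q[1] * w
--         elif q[0] != 1:
--             t -= q[1] * w
--     return (-t, suff[0])
-- ===== Notes on version B (the rewrite author's own statement) =====
-- stated objective: alternative
-- what changed: B works in two staged passes: it first precomputes a suffix-product table of the scale factors, then sums each add/subtract weighted by the product of scales applied after it; A instead makes one forward pass that rescales the running total at every type-1 query.
import Mathlib
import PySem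

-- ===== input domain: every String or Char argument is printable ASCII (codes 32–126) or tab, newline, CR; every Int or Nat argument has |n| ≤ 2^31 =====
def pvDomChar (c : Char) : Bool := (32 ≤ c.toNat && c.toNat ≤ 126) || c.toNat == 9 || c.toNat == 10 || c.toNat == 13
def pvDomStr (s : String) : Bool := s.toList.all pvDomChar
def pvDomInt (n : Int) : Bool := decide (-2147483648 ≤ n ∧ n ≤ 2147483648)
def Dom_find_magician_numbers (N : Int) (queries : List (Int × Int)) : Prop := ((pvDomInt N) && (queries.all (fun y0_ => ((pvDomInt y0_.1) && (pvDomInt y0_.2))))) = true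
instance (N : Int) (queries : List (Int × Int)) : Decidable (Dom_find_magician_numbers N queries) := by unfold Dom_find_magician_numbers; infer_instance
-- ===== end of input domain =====

-- B changes the decomposition (staged suffix-product table + weighted sum instead of
-- A's single rescaling pass); same O(n) cost, return value proved identical.

-- ===== PORT A =====
-- A: one forward pass, rescaling the running total at each type-1 query
def find_magician_numbers (_N : Int) (queries : List (Int × Int)) : Int × Int :=
  let st := queries.foldl (fun (st : Int × Int) q =>
    if q.1 = 1 then (st.1 * q.2, st.2 * q.2)
    else if q.1 = 2 then (st.1, st.2 + q.2)
    else (st.1, st.2 - q.2)) (1, 0)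
  (-st.2, st.1)

-- ===== PORT B =====
-- suffix-product table: pvSuff qs has length |qs|+1; entry i is the product of the
-- scale factors of the type-1 queries from position i on (Source B's backwards index loop,
-- rendered as the structural recursion building the table back-to-front)
def pvSuff : List (Int × Int) → List Int
  | [] => [1]
  | q :: qs =>
    let rest := pvSuff qs
    (if q.1 = 1 then rest.headI * q.2 else rest.headI) :: rest

def find_magician_numbers_alt (_N : Int) (queries : List (Int × Int)) : Int × Int :=
  let suff := pvSuff queries
  let t := (queries.zip suff.tail).foldl (fun t qw =>
    if qw.1.1 = 2 then t + qw.1.2 * qw.2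
    else if qw.1.1 = 1 then t
    else t - qw.1.2 * qw.2) 0
  (-t, suff.headI)

-- ===== PRECONDITION & SPEC =====
def Spec_find_magician_numbers (N : Int) (queries : List (Int × Int)) (out : Int × Int) : Prop := out = find_magician_numbers_alt N queries
instance (N : Int) (queries : List (Int × Int)) (out : Int × Int) : Decidable (Spec_find_magician_numbers N queries out) := by unfold Spec_find_magician_numbers; infer_instance

-- ===== CLAIM (what is proved, stated in full; the proofs are below) =====
def Claim_equal_find_magician_numbers : Prop := ∀ (N : Int) (queries : List (Int × Int)), Dom_find_magician_numbers N queries → Spec_find_magician_numbers N queries (find_magician_numbers N queries)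

-- ===== LEMMAS AND PROOFS =====
theorem pvSuff_cons_headI_tail (qs : List (Int × Int)) :
    pvSuff qs = (pvSuff qs).headI :: (pvSuff qs).tail := by
  cases qs <;> simp [pvSuff]

theorem pv_t_add (l : List ((Int × Int) × Int)) (t0 : Int) :
    l.foldl (fun t qw =>
      if qw.1.1 = 2 then t + qw.1.2 * qw.2
      else if qw.1.1 = 1 then t
      else t - qw.1.2 * qw.2) t0
    = t0 + l.foldl (fun t qw =>
      if qw.1.1 = 2 then t + qw.1.2 * qw.2
      else if qw.1.1 = 1 then t
      else t - qw.1.2 * qw.2) 0 := by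
  induction l generalizing t0 with
  | nil => simp
  | cons x l ih =>
    simp only [List.foldl_cons]
    rw [ih, ih (if x.1.1 = 2 then 0 + x.1.2 * x.2 else if x.1.1 = 1 then 0 else 0 - x.1.2 * x.2)]
    split_ifs <;> ring

-- Key invariant: A's forward fold started from (s0, t0) equals
-- (s0 * P, t0 * P + T), where P is the head of B's suffix table and T is B's weighted sum.
theorem pv_loop_eq (qs : List (Int × Int)) (s0 t0 : Int) :
    qs.foldl (fun (st : Int × Int) q =>
      if q.1 = 1 then (st.1 * q.2, st.2 * q.2)
      else if q.1 = 2 then (st.1, st.2 + q.2)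
      else (st.1, st.2 - q.2)) (s0, t0)
    = (s0 * (pvSuff qs).headI,
       t0 * (pvSuff qs).headI
        + (qs.zip (pvSuff qs).tail).foldl (fun t qw =>
            if qw.1.1 = 2 then t + qw.1.2 * qw.2
            else if qw.1.1 = 1 then t
            else t - qw.1.2 * qw.2) 0) := by
  induction qs generalizing s0 t0 with
  | nil => simp [pvSuff]
  | cons q qs ih =>
    have hz : (q :: qs).zip (pvSuff (q :: qs)).tail
        = (q, (pvSuff qs).headI) :: qs.zip (pvSuff qs).tail := by
      conv_lhs => rw [show (pvSuff (q :: qs)).tail = pvSuff qs from by simp [pvSuff],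
        pvSuff_cons_headI_tail qs]
      simp
    rw [hz]
    simp only [List.foldl_cons]
    rw [ih]
    by_cases h1 : q.1 = 1
    · have h2 : ¬ q.1 = 2 := by omega
      simp [pvSuff, h1, Prod.ext_iff]
      constructor <;> ring
    · by_cases h2 : q.1 = 2
      · simp [pvSuff, h2, Prod.ext_iff]
        rw [pv_t_add (qs.zip (pvSuff qs).tail) (q.2 * (pvSuff qs).headI)]
        ring
      · simp [pvSuff, h1, h2, Prod.ext_iff]
        rw [pv_t_add (qs.zip (pvSuff qs).tail) (-(q.2 * (pvSuff qs).headI))]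
        ring

-- ===== VERDICT (by name: the statement is the Claim_ definition above) =====
theorem find_magician_numbers_spec : Claim_equal_find_magician_numbers := by
  intro N qs _
  unfold Spec_find_magician_numbers find_magician_numbers find_magician_numbers_alt
  rw [pv_loop_eq]
  simp
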